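-- pv_equiv track=rewrite | github.com/aemiliaurban/ash-interactive-dendrogram-tool | ash/common/util.py | assign_clusters
-- ===== SOURCE A (Python) =====
-- def assign_clusters(points):
--     """
--     Assign points to clusters based on their colors.
--
--     Args:
--         points: An ordered dictionary of points with their colors.
--
--     Returns:
--         list: A list of clusters where each cluster is a list of (point_id, color) tuples.
--     """
--     clusters = []
--     current_cluster = []
--
--     for point_id, color in points.items():
--         if not current_cluster or current_cluster[-1][1] != color:
--             if current_cluster:
--                 clusters.append(current_cluster)
--             current_cluster = []
--
--         current_cluster.append((point_id, color))
--
--     if current_cluster: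
--         clusters.append(current_cluster)
--     return clusters
-- ===== SOURCE B (Python) =====
-- def assign_clusters(points):
--     """Group consecutive equal-colored points into clusters by scanning run
--     boundaries: an inner index advances to the end of each color run and a
--     slice of items becomes the cluster (no running accumulator)."""
--     items = list(points.items())
--     clusters = []
--     i = 0
--     n = len(items)
--     while i < n:
--         j = i + 1
--         while j < n and items[j][1] == items[i][1]:
--             j += 1
--         clusters.append(items[i:j])
--         i = j
--     return clusters
-- ===== Notes on version B (the rewrite author's own statement) =====
-- stated objective: alternative
-- what changed: Replaces A's accumulator loop (current_cluster grown element by element, flushed at color changes and after the loop) with a run-boundary scan: an inner index finds the end of each equal-color run and the cluster is emitted as one slice, so there is no running accumulator and no trailing flush.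
import Mathlib
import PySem

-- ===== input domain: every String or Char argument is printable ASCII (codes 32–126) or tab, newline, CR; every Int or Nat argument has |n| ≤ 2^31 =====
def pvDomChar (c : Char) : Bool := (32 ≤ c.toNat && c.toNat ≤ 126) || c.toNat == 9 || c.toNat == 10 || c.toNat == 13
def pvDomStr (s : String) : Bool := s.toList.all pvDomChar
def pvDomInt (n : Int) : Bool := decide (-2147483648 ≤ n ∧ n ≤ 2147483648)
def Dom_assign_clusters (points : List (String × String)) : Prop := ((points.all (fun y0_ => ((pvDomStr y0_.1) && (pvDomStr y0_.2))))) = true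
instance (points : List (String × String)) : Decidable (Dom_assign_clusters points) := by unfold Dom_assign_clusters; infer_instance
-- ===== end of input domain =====

-- B: a run-boundary scan emitting each equal-color run as one slice, instead of A's accumulator-and-flush loop (alternative decomposition, same cost).


-- ===== PORT A =====
-- step of A's for-loop: state = (clusters, current_cluster)
def acStepA (st : List (List (String × String)) × List (String × String))
    (p : String × String) :
    List (List (String × String)) × List (String × String) :=
  let clusters := st.1
  let current := st.2
  -- if not current_cluster or current_cluster[-1][1] != color:
  if current = [] ∨ current.getLast?.map Prod.snd ≠ some p.2 then
    ((if current = [] then clusters else clusters ++ [current]), [] ++ [p])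
  else
    (clusters, current ++ [p])

def assign_clusters (points : List (String × String)) : List (List (String × String)) :=
  let st := points.foldl acStepA ([], [])
  if st.2 = [] then st.1 else st.1 ++ [st.2]

-- ===== PORT B =====
-- inner while of B: length of the run of color c at the front of the rest
def acRunlen (c : String) : List (String × String) → Nat
  | [] => 0
  | q :: rest => if q.2 = c then acRunlen c rest + 1 else 0

-- outer while of B: emit each run as one slice, continue past it
def acChunks : List (String × String) → List (List (String × String))
  | [] => []
  | p :: rest =>
    let k := acRunlen p.2 rest
    (p :: rest.take k) :: acChunks (rest.drop k)
  termination_by l => l.length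
  decreasing_by simp

def assign_clusters_alt (points : List (String × String)) : List (List (String × String)) :=
  acChunks points

-- ===== PRECONDITION & SPEC =====
def Spec_assign_clusters (points : List (String × String)) (out : List (List (String × String))) : Prop := out = assign_clusters_alt points
instance (points : List (String × String)) (out : List (List (String × String))) : Decidable (Spec_assign_clusters points out) := by unfold Spec_assign_clusters; infer_instance

-- ===== CLAIM (what is proved, stated in full; the proofs are below) =====
def Claim_equal_assign_clusters : Prop := ∀ (points : List (String × String)), Dom_assign_clusters points → Spec_assign_clusters points (assign_clusters points)

-- ===== LEMMAS AND PROOFS =====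
theorem acRunlen_congr (c c' : String) (h : c = c') (l : List (String × String)) :
    acRunlen c l = acRunlen c' l := by rw [h]

theorem acFoldA (l : List (String × String)) :
    ∀ (cls : List (List (String × String))) (cur : List (String × String))
      (p : String × String),
    (let st := l.foldl acStepA (cls, cur ++ [p]);
     if st.2 = [] then st.1 else st.1 ++ [st.2]) =
    cls ++ ((cur ++ p :: l.take (acRunlen p.2 l)) :: acChunks (l.drop (acRunlen p.2 l))) := by
  induction l with
  | nil => intro cls cur p; rw [acChunks.eq_def]; simp [acRunlen]
  | cons q l' ih =>
    intro cls cur p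
    by_cases h : q.2 = p.2
    · have hstep : acStepA (cls, cur ++ [p]) q = (cls, (cur ++ [p]) ++ [q]) := by
        simp [acStepA, h]
      simp only [List.foldl_cons, hstep]
      have := ih cls (cur ++ [p]) q
      simp only [this]
      have hr : acRunlen p.2 (q :: l') = acRunlen q.2 l' + 1 := by
        simp [acRunlen, h, acRunlen_congr p.2 q.2 h.symm]
      simp [hr]
    · have hstep : acStepA (cls, cur ++ [p]) q = (cls ++ [cur ++ [p]], [] ++ [q]) := by
        simp [acStepA, Ne.symm h]
      simp only [List.foldl_cons, hstep]
      have := ih (cls ++ [cur ++ [p]]) [] q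
      simp only [this]
      have hr : acRunlen p.2 (q :: l') = 0 := by simp [acRunlen, h]
      rw [hr]
      conv_rhs => rw [acChunks.eq_def]
      simp

-- ===== VERDICT (by name: the statement is the Claim_ definition above) =====
theorem assign_clusters_spec : Claim_equal_assign_clusters := by
  intro points _
  unfold Spec_assign_clusters assign_clusters assign_clusters_alt
  cases points with
  | nil => simp [acChunks.eq_def]
  | cons p l =>
    have hstep : acStepA ([], []) p = ([], [] ++ [p]) := by simp [acStepA]
    simp only [List.foldl_cons, hstep]
    have := acFoldA l [] [] p
    simp only [this]
    conv_rhs => rw [acChunks.eq_def]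
    simp
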